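-- pv_equiv track=rewrite | github.com/jeong1suk/Algorithm | 프로그래머스/2/148653. 마법의 엘리베이터/마법의 엘리베이터.py | solution
-- ===== SOURCE A (Python) =====
-- def solution(storey):
--     answer = 0
--     while storey > 0:
--         num = storey % 10
--
--         if num > 5:
--             answer += (10 - num)
--             storey += (10 - num)
--         elif num < 5:
--             answer += num
--             storey -= num
--         else:
--             tmp = (storey//10) % 10
--             if tmp + 1 > 5:
--                 answer += num
--                 storey += num
--             else:
--                 answer += (10 - num)
--                 storey -= num
--         storey //= 10
--     return answer
-- ===== SOURCE B (Python) =====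
-- def solution(storey):
--     if storey <= 0:
--         return 0
--     if storey < 10:
--         return min(storey, 11 - storey)
--     d, q = storey % 10, storey // 10
--     return min(d + solution(q), (10 - d) + solution(q + 1))
-- ===== Notes on version B (the rewrite author's own statement) =====
-- stated objective: alternative
-- what changed: Replaces A's iterative greedy with per-digit lookahead (the num==5 tie peeks at the next digit) by a plain recursive minimisation over both roundings of the low digit: min(d + solve(storey//10), (10-d) + solve(storey//10 + 1)).
import Mathlib
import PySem

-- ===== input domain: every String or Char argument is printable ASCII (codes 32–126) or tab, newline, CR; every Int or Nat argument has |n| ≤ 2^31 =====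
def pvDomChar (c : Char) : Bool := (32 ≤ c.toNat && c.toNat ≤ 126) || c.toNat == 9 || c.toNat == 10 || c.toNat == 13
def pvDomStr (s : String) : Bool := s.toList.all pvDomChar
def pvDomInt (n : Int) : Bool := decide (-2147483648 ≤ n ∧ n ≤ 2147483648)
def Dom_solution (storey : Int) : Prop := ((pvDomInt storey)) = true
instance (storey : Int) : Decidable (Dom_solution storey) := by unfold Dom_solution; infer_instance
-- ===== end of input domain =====

-- B replaces A's greedy digit loop (with its tie lookahead at digit 5) by a recursive
-- minimisation over rounding the low digit down or up; same values, similar cost.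
-- (Both ports use a structural fuel counter, storey.toNat + 1, which is never exhausted:
-- the loop variable strictly decreases, so fuel only makes the recursion structural.)

-- ===== PORT A =====
def solGo : Nat → Int → Int → Int
  | 0, _, answer => answer
  | fuel + 1, storey, answer =>
    if storey > 0 then
      let num := PySem.Int.mod storey 10
      if num > 5 then
        solGo fuel (PySem.Int.floordiv (storey + (10 - num)) 10) (answer + (10 - num))
      else if num < 5 then
        solGo fuel (PySem.Int.floordiv (storey - num) 10) (answer + num)
      else
        let tmp := PySem.Int.mod (PySem.Int.floordiv storey 10) 10
        if tmp + 1 > 5 then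
          solGo fuel (PySem.Int.floordiv (storey + num) 10) (answer + num)
        else
          solGo fuel (PySem.Int.floordiv (storey - num) 10) (answer + (10 - num))
    else answer

def solution (storey : Int) : Int := solGo (storey.toNat + 1) storey 0

-- ===== PORT B =====
def dpF : Nat → Int → Int
  | 0, _ => 0
  | fuel + 1, storey =>
    if storey ≤ 0 then 0
    else if storey < 10 then min storey (11 - storey)
    else
      let d := PySem.Int.mod storey 10
      let q := PySem.Int.floordiv storey 10
      min (d + dpF fuel q) ((10 - d) + dpF fuel (q + 1))

def solution_alt (storey : Int) : Int := dpF (storey.toNat + 1) storey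

-- ===== PRECONDITION & SPEC =====
def Spec_solution (storey : Int) (out : Int) : Prop := out = solution_alt storey
instance (storey : Int) (out : Int) : Decidable (Spec_solution storey out) := by unfold Spec_solution; infer_instance

-- ===== CLAIM (what is proved, stated in full; the proofs are below) =====
def Claim_equal_solution : Prop := ∀ (storey : Int), Dom_solution storey → Spec_solution storey (solution storey)

-- ===== LEMMAS AND PROOFS =====

theorem pvFd10 (a : Int) : PySem.Int.floordiv a 10 = a / 10 :=
  PySem.Int.floordiv_eq_ediv_of_pos (by norm_num)
theorem pvMd10 (a : Int) : PySem.Int.mod a 10 = a % 10 :=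
  PySem.Int.mod_eq_emod_of_pos (by norm_num)

theorem dpF_congr : ∀ (n m : Nat) (s : Int), s.toNat < n → s.toNat < m → dpF n s = dpF m s := by
  intro n
  induction n with
  | zero => intro m s h _; omega
  | succ n ih =>
    intro m s hn hm
    obtain ⟨m', rfl⟩ : ∃ m', m = m' + 1 := ⟨m - 1, by omega⟩
    simp only [dpF, pvFd10, pvMd10]
    split_ifs with h0 h9
    · rfl
    · rfl
    · rw [ih m' (s / 10) (by omega) (by omega), ih m' (s / 10 + 1) (by omega) (by omega)]

theorem dp_unfold (s : Int) : solution_alt s =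
    if s ≤ 0 then 0
    else if s < 10 then min s (11 - s)
    else min (s % 10 + solution_alt (s / 10)) ((10 - s % 10) + solution_alt (s / 10 + 1)) := by
  have h : solution_alt s = dpF (s.toNat + 1) s := rfl
  rw [h]
  conv_lhs => rw [dpF]
  simp only [pvFd10, pvMd10]
  split_ifs with h0 h9
  · rfl
  · rfl
  · rw [dpF_congr s.toNat ((s / 10).toNat + 1) (s / 10) (by omega) (by omega),
        dpF_congr s.toNat ((s / 10 + 1).toNat + 1) (s / 10 + 1) (by omega) (by omega)]
    rfl

theorem dp_le_zero (s : Int) (h : s ≤ 0) : solution_alt s = 0 := by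
  rw [dp_unfold, if_pos h]

theorem dp_small (s : Int) (h0 : 0 < s) (h9 : s < 10) :
    solution_alt s = min s (11 - s) := by
  rw [dp_unfold, if_neg (by omega), if_pos h9]

-- the recursive equation also holds for single-digit positive inputs
theorem dp_eq (s : Int) (hs : 0 < s) :
    solution_alt s = min (s % 10 + solution_alt (s / 10))
                         ((10 - s % 10) + solution_alt (s / 10 + 1)) := by
  by_cases h9 : s < 10
  · have hq : s / 10 = 0 := by omega
    have hm : s % 10 = s := by omega
    have h1 : solution_alt 1 = 1 := by rw [dp_small 1 (by norm_num) (by norm_num)]; norm_num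
    rw [dp_small s hs h9, hq, hm, dp_le_zero 0 le_rfl]
    norm_num [h1]
    omega
  · rw [dp_unfold, if_neg (by omega), if_neg h9]

theorem dp_nonneg_aux : ∀ (n : Nat) (s : Int), s.toNat ≤ n → 0 ≤ solution_alt s := by
  intro n
  induction n with
  | zero => intro s h; rw [dp_le_zero s (by omega)]
  | succ n ih =>
    intro s h
    by_cases h0 : s ≤ 0
    · rw [dp_le_zero s h0]
    · by_cases h9 : s < 10
      · rw [dp_small s (by omega) h9]; omega
      · rw [dp_eq s (by omega)]
        have i1 := ih (s / 10) (by omega)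
        have i2 := ih (s / 10 + 1) (by omega)
        simp only [min_def]; split_ifs <;> omega

theorem dp_nonneg (s : Int) : 0 ≤ solution_alt s := dp_nonneg_aux s.toNat s le_rfl

-- Lipschitz and monotonicity facts linking solution_alt q and solution_alt (q+1)
theorem dp_step : ∀ (n : Nat) (q : Int), q.toNat ≤ n → 0 ≤ q →
    solution_alt (q + 1) ≤ solution_alt q + 1 ∧
    solution_alt q ≤ solution_alt (q + 1) + 1 ∧
    (5 ≤ q % 10 → solution_alt (q + 1) ≤ solution_alt q) ∧
    (q % 10 < 5 → solution_alt q ≤ solution_alt (q + 1)) := by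
  intro n
  induction n with
  | zero =>
    intro q hn h0
    have hq : q = 0 := by omega
    subst hq
    have h1 : solution_alt 1 = 1 := by rw [dp_small 1 (by norm_num) (by norm_num)]; norm_num
    norm_num [h1, dp_le_zero 0 le_rfl]
  | succ n ih =>
    intro q hn h0
    by_cases hq0 : q = 0
    · subst hq0
      have h1 : solution_alt 1 = 1 := by rw [dp_small 1 (by norm_num) (by norm_num)]; norm_num
      norm_num [h1, dp_le_zero 0 le_rfl]
    · have hqpos : 0 < q := by omega
      have hr0 : 0 ≤ q / 10 := by omega
      have hrlt : (q / 10).toNat ≤ n := by omega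
      obtain ⟨L1, L2, L3, L4⟩ := ih (q / 10) hrlt hr0
      rw [dp_eq q hqpos, dp_eq (q + 1) (by omega)]
      by_cases ht : q % 10 ≤ 8
      · -- low digit of q+1 is t+1, same quotient
        have e1 : (q + 1) % 10 = q % 10 + 1 := by omega
        have e2 : (q + 1) / 10 = q / 10 := by omega
        rw [e1, e2]
        have n1 := dp_nonneg (q / 10)
        have n2 := dp_nonneg (q / 10 + 1)
        simp only [min_def]
        split_ifs <;> omega
      · -- t = 9 : q+1 rolls over to digit 0, quotient r+1
        have ht9 : q % 10 = 9 := by omega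
        have e1 : (q + 1) % 10 = 0 := by omega
        have e2 : (q + 1) / 10 = q / 10 + 1 := by omega
        have hr1 : (q / 10 + 1).toNat ≤ n := by omega
        obtain ⟨K1, K2, K3, K4⟩ := ih (q / 10 + 1) hr1 (by omega)
        rw [e1, e2]
        have n1 := dp_nonneg (q / 10)
        have n2 := dp_nonneg (q / 10 + 1)
        have n3 := dp_nonneg (q / 10 + 1 + 1)
        simp only [min_def]
        split_ifs <;> omega

theorem solGo_eq_dp : ∀ (n : Nat) (s a : Int), s.toNat < n → solGo n s a = a + solution_alt s := by
  intro n
  induction n with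
  | zero => intro s a h; omega
  | succ n ih =>
    intro s a hn
    by_cases hs : s > 0
    · simp only [solGo, pvFd10, pvMd10]
      rw [if_pos hs]
      obtain ⟨L1, L2, L3, L4⟩ := dp_step n (s / 10) (by omega) (by omega)
      rw [dp_eq s hs]
      split_ifs with h5 hlt htmp
      · have e : (s + (10 - s % 10)) / 10 = s / 10 + 1 := by omega
        rw [e, ih _ _ (by omega)]
        simp only [min_def]; split_ifs <;> omega
      · have e : (s - s % 10) / 10 = s / 10 := by omega
        rw [e, ih _ _ (by omega)]
        simp only [min_def]; split_ifs <;> omega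
      · have e : (s + s % 10) / 10 = s / 10 + 1 := by omega
        have hd5 : s % 10 = 5 := by omega
        rw [e, ih _ _ (by omega)]
        simp only [min_def]; split_ifs <;> omega
      · have e : (s - s % 10) / 10 = s / 10 := by omega
        have hd5 : s % 10 = 5 := by omega
        rw [e, ih _ _ (by omega)]
        simp only [min_def]; split_ifs <;> omega
    · simp only [solGo]
      rw [if_neg hs, dp_le_zero s (by omega)]
      ring

-- ===== VERDICT (by name: the statement is the Claim_ definition above) =====
theorem solution_spec : Claim_equal_solution := by
  intro s _
  unfold Spec_solution solution
  rw [solGo_eq_dp (s.toNat + 1) s 0 (by omega)]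
  ring
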